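-- pv_equiv track=rewrite | github.com/haolunc/ARC-RL | reference_solutions/solutions/3bdb4ada.py | transform
-- ===== SOURCE A (Python) =====
-- def transform(grid):
--
--     g = [row[:] for row in grid]
--     if not g:
--         return g
--     R = len(g)
--     C = len(g[0])
--
--     for i in range(R - 2):
--         j = 0
--         while j < C:
--             c = g[i][j]
--             if c != 0 and g[i+1][j] == c and g[i+2][j] == c:
--
--                 start = j
--                 k = j
--                 while k < C and g[i][k] == c and g[i+1][k] == c and g[i+2][k] == c:
--                     k += 1
--                 end = k - 1
--
--                 for col in range(start, end + 1):
--                     g[i+1][col] = c if ((col - start) % 2 == 0) else 0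
--                 j = k
--             else:
--                 j += 1
--     return g
-- ===== SOURCE B (Python) =====
-- def transform(grid):
--     g = [list(row) for row in grid]
--     for i in range(len(g) - 2):
--         run = 0
--         prev = 0
--         for j in range(len(g[0])):
--             c = g[i][j]
--             if c != 0 and g[i+1][j] == c and g[i+2][j] == c:
--                 run = run + 1 if (run > 0 and c == prev) else 1
--                 g[i+1][j] = c if run % 2 == 1 else 0
--                 prev = c
--             else:
--                 run = 0
--     return g
-- ===== Notes on version B (the rewrite author's own statement) =====
-- stated objective: simpler
-- what changed: A's nested find-maximal-run-then-fill loops per band are replaced by a single left-to-right pass per band that keeps a run-length counter and the previous run colour and writes each middle cell immediately.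
-- outside the precondition, e.g. on transform([[0, 0], [0], [0]]): A returns [[0, 0], [0], [0]], B returns [[0, 0], [0], [0]]
import Mathlib
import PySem

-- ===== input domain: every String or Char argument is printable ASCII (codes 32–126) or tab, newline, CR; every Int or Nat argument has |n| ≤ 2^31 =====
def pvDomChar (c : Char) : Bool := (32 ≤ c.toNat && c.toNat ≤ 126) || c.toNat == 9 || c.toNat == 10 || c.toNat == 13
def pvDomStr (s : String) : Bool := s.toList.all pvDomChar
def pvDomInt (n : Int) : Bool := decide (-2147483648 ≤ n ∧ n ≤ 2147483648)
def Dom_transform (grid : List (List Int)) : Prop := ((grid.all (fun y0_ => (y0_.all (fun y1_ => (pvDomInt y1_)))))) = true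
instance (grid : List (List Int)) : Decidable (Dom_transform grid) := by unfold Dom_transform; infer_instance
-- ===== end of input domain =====

-- B replaces A's find-maximal-run-then-fill nested loops by one left-to-right pass per band
-- keeping a run-length counter (objective: simpler).

-- ===== PORT A =====
-- in-range reads in Python (guaranteed by Pre_) are exact; out of range gget defaults to 0 / gset is a no-op
def gget (g : List (List Int)) (i j : Nat) : Int := (g.getD i []).getD j 0
def gset (g : List (List Int)) (i j : Nat) (v : Int) : List (List Int) :=
  g.modify i (fun row => row.set j v)

-- inner while loop advancing k while the three rows keep colour c; the while loop
-- advances k by 1 each iteration and stops at C, so fuel C - k makes it exact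
def aRun (g : List (List Int)) (i C : Nat) (c : Int) : Nat → Nat → Nat
  | 0, k => k
  | fuel+1, k =>
    if k < C ∧ gget g i k = c ∧ gget g (i+1) k = c ∧ gget g (i+2) k = c then
      aRun g i C c fuel (k+1)
    else k

-- the outer while loop over j; the run case fills g[i+1][start..end] alternating c,0,…
-- and jumps to k; j grows by at least 1 per iteration, so fuel C - j makes it exact
def aScan (g : List (List Int)) (i C : Nat) : Nat → Nat → List (List Int)
  | 0, _ => g
  | fuel+1, j =>
    if j < C then
      if gget g i j ≠ 0 ∧ gget g (i+1) j = gget g i j ∧ gget g (i+2) j = gget g i j then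
        aScan ((List.range' j (aRun g i C (gget g i j) (C - j) j - j)).foldl
            (fun h col => gset h (i+1) col (if (col - j) % 2 = 0 then gget g i j else 0)) g)
          i C fuel (aRun g i C (gget g i j) (C - j) j)
      else aScan g i C fuel (j+1)
    else g

def transform (grid : List (List Int)) : List (List Int) :=
  if grid = [] then grid
  else (List.range (grid.length - 2)).foldl
    (fun g i => aScan g i ((grid.headD []).length) ((grid.headD []).length) 0) grid

-- ===== PORT B =====
-- single pass per band: run counter and previous run colour
-- Source B computes the new run once (`run = run + 1 if … else 1`) and then uses it; the
-- update is written out twice here only to avoid a `let`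
def bStep (i : Nat) (s : List (List Int) × Nat × Int) (j : Nat) : List (List Int) × Nat × Int :=
  match s with
  | (g, run, prev) =>
    if gget g i j ≠ 0 ∧ gget g (i+1) j = gget g i j ∧ gget g (i+2) j = gget g i j then
      (gset g (i+1) j
        (if (if 0 < run ∧ gget g i j = prev then run + 1 else 1) % 2 = 1 then gget g i j else 0),
       (if 0 < run ∧ gget g i j = prev then run + 1 else 1), gget g i j)
    else (g, 0, prev)

def transform_alt (grid : List (List Int)) : List (List Int) :=
  (List.range (grid.length - 2)).foldl
    (fun g i => ((List.range ((g.headD []).length)).foldl (bStep i) (g, 0, 0)).1) grid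

-- ===== PRECONDITION & SPEC =====
-- Pre_ excludes ragged grids with at least 3 rows: there Python A's IndexError (and B's) depends on
-- the cell values through short-circuit evaluation, so A usually raises; on the few such grids where
-- A still returns (all triples blocked by zeros) B returns the same value.
def Pre_transform (grid : List (List Int)) : Prop :=
  3 ≤ grid.length → ∀ row ∈ grid, (grid.headD []).length ≤ row.length
instance (grid : List (List Int)) : Decidable (Pre_transform grid) := by
  unfold Pre_transform; infer_instance

def pvWitness_transform : List (List Int) := [[2,2,2],[2,2,2],[2,2,2]]

def Spec_transform (grid : List (List Int)) (out : List (List Int)) : Prop := out = transform_alt grid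
instance (grid : List (List Int)) (out : List (List Int)) : Decidable (Spec_transform grid out) := by unfold Spec_transform; infer_instance

-- ===== CLAIM (what is proved, stated in full; the proofs are below) =====
def Claim_equal_transform : Prop := ∀ (grid : List (List Int)), Dom_transform grid → Pre_transform grid → Spec_transform grid (transform grid)

-- ===== LEMMAS AND PROOFS =====

theorem headD_getD (l : List (List Int)) : l.headD [] = l.getD 0 [] := by
  cases l <;> rfl

theorem gget_gset_ne (g : List (List Int)) (r c : Nat) (v : Int) (r' c' : Nat)
    (h : r ≠ r' ∨ c ≠ c') : gget (gset g r c v) r' c' = gget g r' c' := by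
  simp only [gget, gset, List.getD_eq_getElem?_getD, List.getElem?_modify]
  cases hg : g[r']? with
  | none => simp
  | some row =>
    by_cases hr : r = r'
    · subst hr
      rcases h with h | h
      · exact absurd rfl h
      · simp
        rw [List.getElem?_set, if_neg h]
    · simp [hr]

theorem rowlen_gset (g : List (List Int)) (r c : Nat) (v : Int) (t : Nat) :
    ((gset g r c v).getD t []).length = (g.getD t []).length := by
  simp only [gset, List.getD_eq_getElem?_getD, List.getElem?_modify]
  cases hg : g[t]? with
  | none => simp
  | some row => by_cases hr : r = t <;> simp [hr]

theorem foldl_congr_mem' {α β : Type} :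
    ∀ (l : List α) (f g : β → α → β) (b : β),
      (∀ b' a, a ∈ l → f b' a = g b' a) → l.foldl f b = l.foldl g b := by
  intro l
  induction l with
  | nil => intros; rfl
  | cons a l ih =>
    intro f g b h
    simp only [List.foldl_cons]
    rw [h b a (List.mem_cons_self ..)]
    exact ih f g _ (fun b' a' ha' => h b' a' (List.mem_cons_of_mem _ ha'))

theorem rowlen_foldl {α : Type} {F : List (List Int) → α → List (List Int)}
    (hF : ∀ g a t, ((F g a).getD t []).length = (g.getD t []).length) :
    ∀ (l : List α) (g : List (List Int)) (t : Nat),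
      ((l.foldl F g).getD t []).length = (g.getD t []).length := by
  intro l
  induction l with
  | nil => intros; rfl
  | cons a l ih => intro g t; simp only [List.foldl_cons]; rw [ih]; exact hF g a t

theorem gget_foldl_ne {α : Type} {F : List (List Int) → α → List (List Int)} (t : Nat)
    (P : α → Prop) (hF : ∀ g a, P a → ∀ r', gget (F g a) r' t = gget g r' t) :
    ∀ (l : List α) (g : List (List Int)), (∀ a ∈ l, P a) → ∀ r',
      gget (l.foldl F g) r' t = gget g r' t := by
  intro l
  induction l with
  | nil => intros; rfl
  | cons a l ih =>
    intro g hl r'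
    simp only [List.foldl_cons]
    rw [ih _ (fun a' ha' => hl a' (List.mem_cons_of_mem _ ha')),
        hF g a (hl a (List.mem_cons_self ..))]

-- facts about aRun
theorem aRun_le (g : List (List Int)) (i C : Nat) (c : Int) :
    ∀ fuel k, k ≤ aRun g i C c fuel k := by
  intro fuel
  induction fuel with
  | zero => intro k; exact le_refl k
  | succ n ih =>
    intro k
    simp only [aRun]
    split
    · exact Nat.le_trans (Nat.le_succ k) (ih (k+1))
    · exact le_refl k

theorem aRun_gt (g : List (List Int)) (i C j : Nat) (c : Int) (fuel : Nat) (hf : 0 < fuel)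
    (hj : j < C) (h1 : gget g i j = c) (h2 : gget g (i+1) j = c) (h3 : gget g (i+2) j = c) :
    j < aRun g i C c fuel j := by
  cases fuel with
  | zero => omega
  | succ n =>
    simp only [aRun]
    rw [if_pos ⟨hj, h1, h2, h3⟩]
    exact Nat.lt_of_lt_of_le (Nat.lt_succ_self j) (aRun_le g i C c n (j+1))

theorem aRun_leC (g : List (List Int)) (i C : Nat) (c : Int) :
    ∀ fuel k, k ≤ C → aRun g i C c fuel k ≤ C := by
  intro fuel
  induction fuel with
  | zero => intro k hk; exact hk
  | succ n ih =>
    intro k hk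
    simp only [aRun]
    split
    · rename_i h; exact ih (k+1) (by omega)
    · exact hk

theorem aRun_mem (g : List (List Int)) (i C : Nat) (c : Int) :
    ∀ fuel k t, k ≤ t → t < aRun g i C c fuel k →
      gget g i t = c ∧ gget g (i+1) t = c ∧ gget g (i+2) t = c := by
  intro fuel
  induction fuel with
  | zero => intro k t ht1 ht2; simp only [aRun] at ht2; omega
  | succ n ih =>
    intro k t ht1 ht2
    simp only [aRun] at ht2
    split at ht2
    · rename_i h
      by_cases htk : t = k
      · subst htk; exact ⟨h.2.1, h.2.2.1, h.2.2.2⟩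
      · exact ih (k+1) t (by omega) ht2
    · omega

theorem aRun_stop (g : List (List Int)) (i C : Nat) (c : Int) :
    ∀ fuel k, C - k ≤ fuel →
      ¬(aRun g i C c fuel k < C ∧ gget g i (aRun g i C c fuel k) = c ∧
        gget g (i+1) (aRun g i C c fuel k) = c ∧ gget g (i+2) (aRun g i C c fuel k) = c) := by
  intro fuel
  induction fuel with
  | zero =>
    intro k hf
    rintro ⟨h1, h2⟩
    simp only [aRun] at h1
    omega
  | succ n ih =>
    intro k hf
    simp only [aRun]
    split
    · rename_i h; exact ih (k+1) (by omega)
    · rename_i h; exact h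

-- the run colour / triple condition, on which both programs agree
def qual (g : List (List Int)) (i j : Nat) (c : Int) : Prop :=
  c ≠ 0 ∧ gget g i j = c ∧ gget g (i+1) j = c ∧ gget g (i+2) j = c

-- B's single pass over a full run of colour c writes exactly A's alternating fill
theorem run_fold (i : Nat) (c : Int) :
    ∀ (m j : Nat) (g : List (List Int)) (r : Nat), 0 < r →
      (∀ s, s < m → qual g i (j+s) c) →
      (List.range' j m).foldl (bStep i) (g, r, c) =
        ((List.range' j m).foldl
          (fun h col => gset h (i+1) col (if (col - j + r) % 2 = 0 then c else 0)) g,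
         r + m, c) := by
  intro m
  induction m with
  | zero => intro j g r hr _; rfl
  | succ m ih =>
    intro j g r hr hq
    have hqj : qual g i j c := by simpa using hq 0 (Nat.succ_pos m)
    obtain ⟨hc0, hgi, hgi1, hgi2⟩ := hqj
    rw [List.range'_succ]
    simp only [List.foldl_cons]
    have hv : (if (r + 1) % 2 = 1 then c else 0) = (if (j - j + r) % 2 = 0 then c else 0) := by
      split_ifs <;> omega
    have hb : bStep i (g, r, c) j =
        (gset g (i+1) j (if (j - j + r) % 2 = 0 then c else 0), r + 1, c) := by
      show (if gget g i j ≠ 0 ∧ gget g (i+1) j = gget g i j ∧ gget g (i+2) j = gget g i j then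
          (gset g (i+1) j
            (if (if 0 < r ∧ gget g i j = c then r + 1 else 1) % 2 = 1 then gget g i j else 0),
           (if 0 < r ∧ gget g i j = c then r + 1 else 1), gget g i j)
        else (g, 0, c)) = _
      rw [hgi, if_pos ⟨hc0, hgi1, hgi2⟩]
      rw [if_pos (⟨hr, rfl⟩ : 0 < r ∧ c = c)]
      rw [hv]
    rw [hb]
    have hq1 : ∀ s, s < m → qual (gset g (i+1) j (if (j - j + r) % 2 = 0 then c else 0)) i (j+1+s) c := by
      intro s hs
      have hqs := hq (s+1) (by omega)
      rw [show j + (s+1) = j + 1 + s from by omega] at hqs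
      exact ⟨hqs.1,
        by rw [gget_gset_ne g (i+1) j _ i (j+1+s) (Or.inr (by omega))]; exact hqs.2.1,
        by rw [gget_gset_ne g (i+1) j _ (i+1) (j+1+s) (Or.inr (by omega))]; exact hqs.2.2.1,
        by rw [gget_gset_ne g (i+1) j _ (i+2) (j+1+s) (Or.inr (by omega))]; exact hqs.2.2.2⟩
    rw [ih (j+1) _ (r+1) (by omega) hq1]
    simp only [Prod.mk.injEq]
    refine ⟨?_, by omega, trivial⟩
    apply foldl_congr_mem'
    intro b' col hcol
    rcases List.mem_range'.1 hcol with ⟨s, hs, rfl⟩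
    have : j + 1 + 1 * s - (j+1) + (r+1) = j + 1 + 1 * s - j + r := by omega
    rw [this]

-- A's scan of band i equals B's single pass, given B's state cannot continue a run at j
theorem band (i C : Nat) :
    ∀ fuel j (g : List (List Int)) (r : Nat) (pc : Int), C - j ≤ fuel →
      (0 < r → C ≤ j ∨ ¬ qual g i j pc) →
      aScan g i C fuel j = ((List.range' j (C - j)).foldl (bStep i) (g, r, pc)).1 := by
  intro fuel
  induction fuel with
  | zero =>
    intro j g r pc hf _
    rw [show C - j = 0 by omega]
    rfl
  | succ n ih =>
    intro j g r pc hf H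
    by_cases hj : j < C
    · simp only [aScan]
      rw [if_pos hj]
      by_cases h2 : gget g i j ≠ 0 ∧ gget g (i+1) j = gget g i j ∧ gget g (i+2) j = gget g i j
      · rw [if_pos h2]
        obtain ⟨hne, hA1, hA2⟩ := h2
        generalize hc : gget g i j = c at hne hA1 hA2 ⊢
        have hgt : j < aRun g i C c (C - j) j :=
          aRun_gt g i C j c (C - j) (by omega) hj hc hA1 hA2
        have hkC : aRun g i C c (C - j) j ≤ C := aRun_leC g i C c (C - j) j (by omega)
        have hmem : ∀ t, j ≤ t → t < aRun g i C c (C - j) j → qual g i t c :=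
          fun t h1 h3 => ⟨hne, (aRun_mem g i C c (C - j) j t h1 h3).1,
            (aRun_mem g i C c (C - j) j t h1 h3).2.1, (aRun_mem g i C c (C - j) j t h1 h3).2.2⟩
        have hstop := aRun_stop g i C c (C - j) j (le_refl _)
        generalize hK : aRun g i C c (C - j) j = k at hgt hkC hmem hstop ⊢
        have hnotcont : ¬(0 < r ∧ c = pc) := by
          rintro ⟨hr, hpc⟩
          rcases H hr with h | h
          · omega
          · exact h ⟨hpc ▸ hne, hc.trans hpc, hA1.trans hpc, hA2.trans hpc⟩
        have hb : bStep i (g, r, pc) j = (gset g (i+1) j c, 1, c) := by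
          show (if gget g i j ≠ 0 ∧ gget g (i+1) j = gget g i j ∧ gget g (i+2) j = gget g i j then
              (gset g (i+1) j
                (if (if 0 < r ∧ gget g i j = pc then r + 1 else 1) % 2 = 1 then gget g i j else 0),
               (if 0 < r ∧ gget g i j = pc then r + 1 else 1), gget g i j)
            else (g, 0, pc)) = _
          rw [hc, if_pos ⟨hne, hA1, hA2⟩, if_neg hnotcont]
          norm_num
        have hsplit : List.range' j (C - j) =
            j :: (List.range' (j+1) (k - (j+1)) ++ List.range' k (C - k)) := by
          have happ := List.range'_append (s := j+1) (m := k - (j+1)) (n := C - k) (step := 1)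
          rw [show j + 1 + 1 * (k - (j+1)) = k by omega,
              show (k - (j+1)) + (C - k) = C - (j+1) by omega] at happ
          rw [show C - j = (C - (j+1)) + 1 by omega, List.range'_succ, ← happ]
        rw [hsplit, List.foldl_cons, hb, List.foldl_append]
        have hq1 : ∀ s, s < k - (j+1) → qual (gset g (i+1) j c) i (j+1+s) c := by
          intro s hs
          have hqs := hmem (j+1+s) (by omega) (by omega)
          exact ⟨hqs.1,
            by rw [gget_gset_ne g (i+1) j c i (j+1+s) (Or.inr (by omega))]; exact hqs.2.1,
            by rw [gget_gset_ne g (i+1) j c (i+1) (j+1+s) (Or.inr (by omega))]; exact hqs.2.2.1,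
            by rw [gget_gset_ne g (i+1) j c (i+2) (j+1+s) (Or.inr (by omega))]; exact hqs.2.2.2⟩
        rw [run_fold i c (k - (j+1)) (j+1) (gset g (i+1) j c) 1 Nat.one_pos hq1]
        have hAfill : (List.range' j (k - j)).foldl
              (fun h col => gset h (i+1) col (if (col - j) % 2 = 0 then c else 0)) g
            = (List.range' (j+1) (k - (j+1))).foldl
              (fun h col => gset h (i+1) col (if (col - (j+1) + 1) % 2 = 0 then c else 0))
              (gset g (i+1) j c) := by
          rw [show k - j = (k - (j+1)) + 1 by omega, List.range'_succ, List.foldl_cons,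
              show (if (j - j) % 2 = 0 then c else 0) = c by norm_num]
          apply foldl_congr_mem'
          intro b' col hcol
          rcases List.mem_range'.1 hcol with ⟨s, hs, rfl⟩
          rw [show j + 1 + 1 * s - (j+1) + 1 = j + 1 + 1 * s - j by omega]
        rw [hAfill]
        apply ih k _ (1 + (k - (j+1))) c (by omega)
        intro _
        by_cases hkC' : k < C
        · right
          intro hqk
          have hget : ∀ r', gget ((List.range' (j+1) (k - (j+1))).foldl
              (fun h col => gset h (i+1) col (if (col - (j+1) + 1) % 2 = 0 then c else 0))
              (gset g (i+1) j c)) r' k = gget g r' k := by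
            intro r'
            rw [gget_foldl_ne (F := fun h col => gset h (i+1) col (if (col - (j+1) + 1) % 2 = 0 then c else 0))
                  k (fun col => col ≠ k)
                  (fun g' col hcol r'' => gget_gset_ne g' (i+1) col _ r'' k (Or.inr hcol))
                  _ _ (fun col hcol => by
                    rcases List.mem_range'.1 hcol with ⟨s, hs, rfl⟩; omega) r',
                gget_gset_ne g (i+1) j c r' k (Or.inr (by omega))]
          rw [qual, hget, hget, hget] at hqk
          exact hstop ⟨hkC', hqk.2.1, hqk.2.2.1, hqk.2.2.2⟩
        · left; omega
      · rw [if_neg h2]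
        have hb : bStep i (g, r, pc) j = (g, 0, pc) := by
          show (if gget g i j ≠ 0 ∧ gget g (i+1) j = gget g i j ∧ gget g (i+2) j = gget g i j then
              (gset g (i+1) j
                (if (if 0 < r ∧ gget g i j = pc then r + 1 else 1) % 2 = 1 then gget g i j else 0),
               (if 0 < r ∧ gget g i j = pc then r + 1 else 1), gget g i j)
            else (g, 0, pc)) = _
          rw [if_neg h2]
        rw [show C - j = (C - (j+1)) + 1 by omega, List.range'_succ, List.foldl_cons, hb]
        exact ih (j+1) g 0 pc (by omega) (fun h => absurd h (by omega))
    · simp only [aScan]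
      rw [if_neg hj, show C - j = 0 by omega]
      rfl

-- aScan preserves every row length
theorem aScan_rowlen (i C : Nat) :
    ∀ fuel j (g : List (List Int)) (t : Nat),
      ((aScan g i C fuel j).getD t []).length = (g.getD t []).length := by
  intro fuel
  induction fuel with
  | zero => intros; rfl
  | succ n ih =>
    intro j g t
    simp only [aScan]
    by_cases hj : j < C
    · rw [if_pos hj]
      by_cases h2 : gget g i j ≠ 0 ∧ gget g (i+1) j = gget g i j ∧ gget g (i+2) j = gget g i j
      · rw [if_pos h2, ih]
        exact rowlen_foldl
          (F := fun h col => gset h (i+1) col (if (col - j) % 2 = 0 then gget g i j else 0))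
          (fun g' a t' => rowlen_gset g' (i+1) a _ t') _ g t
      · rw [if_neg h2]
        exact ih (j+1) g t
    · rw [if_neg hj]

-- folding the bands: A's fold equals B's fold while the head row length stays C
theorem outer_eq (C : Nat) :
    ∀ (l : List Nat) (g : List (List Int)), (g.headD []).length = C →
      l.foldl (fun g i => aScan g i C C 0) g =
      l.foldl (fun g i => ((List.range ((g.headD []).length)).foldl (bStep i) (g, 0, 0)).1) g := by
  intro l
  induction l with
  | nil => intros; rfl
  | cons a l ih =>
    intro g hg
    simp only [List.foldl_cons]
    have hband : aScan g a C C 0 = ((List.range ((g.headD []).length)).foldl (bStep a) (g, 0, 0)).1 := by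
      rw [hg, List.range_eq_range']
      have hb := band a C C 0 g 0 0 (by omega) (fun h => absurd h (by omega))
      rw [Nat.sub_zero] at hb
      exact hb
    rw [← hband]
    exact ih (aScan g a C C 0) (by
      rw [headD_getD, aScan_rowlen a C C 0 g 0, ← headD_getD, hg])

-- ===== VERDICT (by name: the statement is the Claim_ definition above) =====
theorem transform_spec : Claim_equal_transform := by
  intro grid _ _
  unfold Spec_transform transform transform_alt
  by_cases hg : grid = []
  · subst hg; rfl
  · rw [if_neg hg]
    exact outer_eq ((grid.headD []).length) (List.range (grid.length - 2)) grid rfl
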